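-- pv_equiv track=rewrite | github.com/yhs3434/Algorithms | programmers/2019 KAKAO WINTER Internship/steppingStone.py | solution
-- ===== SOURCE A (Python) =====
-- def solution(stones, k):
--     answer = 0
--
--     left = 0
--     right = max(stones)
--
--     while left <= right:
--         mid = (left + right) // 2
--         here = -1
--         flag = True
--         while here + k < len(stones):
--             here = goAvail(here, stones, mid, k)
--             if here == -1:
--                 flag = False
--                 break
--         if flag:
--             if mid > answer:
--                 answer = mid
--             left = mid + 1
--         else:
--             right = mid - 1
--
--     return answer
--
-- def goAvail(here, stones, water, k):
--     limit = here + k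
--     idx = limit
--     flag = False
--     for i in range(limit, here, -1):
--         if stones[i] >= water:
--             idx = i
--             flag = True
--             break
--     if flag:
--         return idx
--     else:
--         return -1
-- ===== SOURCE B (Python) =====
-- def solution(stones, k):
--     # The largest crossable water level equals the minimum, over all windows of
--     # w = min(k, len(stones)) consecutive stones, of that window's maximum,
--     # clamped below at 0.  Window maxima are computed in O(n) by the block
--     # decomposition: blocks of size w with per-block prefix and suffix maxima.
--     if k <= 0:
--         return 0
--     n = len(stones)
--     w = min(k, n)
--     pre = []                      # pre[i] = max(stones[i - i % w : i + 1])
--     for i in range(n):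
--         if i % w == 0:
--             pre.append(stones[i])
--         else:
--             pre.append(max(pre[-1], stones[i]))
--     suf = []                      # suf[i] = max of stones from i to its block end
--     for i in range(n - 1, -1, -1):
--         if i % w == w - 1 or i == n - 1:
--             suf.append(stones[i])
--         else:
--             suf.append(max(suf[-1], stones[i]))
--     suf.reverse()
--     best = None
--     for j in range(n - w + 1):
--         m = max(suf[j], pre[j + w - 1])
--         if best is None or m < best:
--             best = m
--     return max(0, best)
-- ===== Notes on version B (the rewrite author's own statement) =====
-- stated objective: alternative
-- what changed: Replaces A's binary search over water levels (each level re-checked by greedy jumping) with a direct O(n) computation: per-block prefix/suffix maxima give every size-min(k,n) window maximum, and the answer is their minimum clamped at 0.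
import Mathlib
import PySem

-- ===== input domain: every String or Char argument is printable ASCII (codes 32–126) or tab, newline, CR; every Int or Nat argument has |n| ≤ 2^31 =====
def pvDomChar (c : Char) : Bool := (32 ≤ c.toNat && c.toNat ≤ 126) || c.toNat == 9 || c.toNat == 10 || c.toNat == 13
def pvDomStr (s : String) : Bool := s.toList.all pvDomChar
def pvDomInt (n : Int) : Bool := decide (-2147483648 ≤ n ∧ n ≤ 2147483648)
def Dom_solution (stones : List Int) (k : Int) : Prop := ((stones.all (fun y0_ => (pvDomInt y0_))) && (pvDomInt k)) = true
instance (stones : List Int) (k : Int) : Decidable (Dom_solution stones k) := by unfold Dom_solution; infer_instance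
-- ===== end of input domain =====

-- B is an alternative algorithm (min over size-min(k,n) windows of the window max, clamped at 0)
-- replacing A's binary search + greedy reachability check; equivalence of the RETURN value is proved.

-- ===== PORT A =====
-- goAvail: the for-loop over range(here+k, here, -1) with break is a first-hit search (find?).
def goAvail (here : Int) (stones : List Int) (water : Int) (k : Int) : Int :=
  let limit := here + k
  match (PySem.List.pyRange limit here (-1)).find?
      (fun i => decide (water ≤ PySem.List.pyGetD stones i 0)) with
  | some idx => idx
  | none => -1

-- cited by checkLoop's decreasing_by: a non-(-1) result of goAvail lies in (here, here+k]
theorem goAvail_ne_bounds (here : Int) (stones : List Int) (water k : Int)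
    (h : goAvail here stones water k ≠ -1) :
    here < goAvail here stones water k ∧ goAvail here stones water k ≤ here + k := by
  unfold goAvail at *
  rcases hf : (PySem.List.pyRange (here + k) here (-1)).find?
      (fun i => decide (water ≤ PySem.List.pyGetD stones i 0)) with _ | idx
  · simp [hf] at h
  · have hm := List.mem_of_find?_eq_some hf
    rw [PySem.List.mem_pyRange_neg_one] at hm
    simp [hf]
    omega

-- the inner while loop of A (advance with goAvail until here + k ≥ len or stuck); returns A's flag
def checkLoop (stones : List Int) (water : Int) (k : Int) (here : Int) : Bool :=
  if _h : here + k < (stones.length : Int) then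
    let h' := goAvail here stones water k
    if _h2 : h' = -1 then false
    else checkLoop stones water k h'
  else true
termination_by ((stones.length : Int) - here).toNat
decreasing_by
  have hb := goAvail_ne_bounds here stones water k _h2
  omega

-- the outer while loop of A (binary search on the water level)
def bsLoop (stones : List Int) (k : Int) (left right answer : Int) : Int :=
  if _h : left ≤ right then
    let mid := PySem.Int.floordiv (left + right) 2
    if checkLoop stones mid k (-1) then
      bsLoop stones k (mid + 1) right (if mid > answer then mid else answer)
    else
      bsLoop stones k left (mid - 1) answer
  else answer
termination_by (right - left + 1).toNat
decreasing_by
  · have hb := PySem.Int.floordiv_two_mid_bounds _h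
    omega
  · have hb := PySem.Int.floordiv_two_mid_bounds _h
    omega

def solution (stones : List Int) (k : Int) : Int :=
  bsLoop stones k 0 ((PySem.List.max? stones (fun x => x)).getD 0) 0

-- ===== PORT B =====
def solution_alt (stones : List Int) (k : Int) : Int :=
  if k ≤ 0 then 0
  else
    let n : Int := (stones.length : Int)
    let w : Int := min k n
    let pre := (PySem.List.pyRange 0 n 1).foldl
      (fun pre i =>
        if PySem.Int.mod i w = 0 then pre ++ [PySem.List.pyGetD stones i 0]
        else pre ++ [max (PySem.List.pyGetD pre (-1) 0) (PySem.List.pyGetD stones i 0)])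
      []
    let suf := ((PySem.List.pyRange (n - 1) (-1) (-1)).foldl
      (fun suf i =>
        if PySem.Int.mod i w = w - 1 ∨ i = n - 1 then suf ++ [PySem.List.pyGetD stones i 0]
        else suf ++ [max (PySem.List.pyGetD suf (-1) 0) (PySem.List.pyGetD stones i 0)])
      []).reverse
    let best := (PySem.List.pyRange 0 (n - w + 1) 1).foldl
      (fun best j =>
        let m := max (PySem.List.pyGetD suf j 0) (PySem.List.pyGetD pre (j + w - 1) 0)
        match best with
        | none => some m
        | some b => if m < b then some m else some b)
      none
    max 0 (best.getD 0)

-- ===== PRECONDITION & SPEC =====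
-- Pre_ excludes only the empty list, on which A raises ValueError (max of an empty sequence).
def Pre_solution (stones : List Int) (k : Int) : Prop := stones ≠ []
instance (stones : List Int) (k : Int) : Decidable (Pre_solution stones k) := by
  unfold Pre_solution; infer_instance

def pvWitness_solution : List Int × Int := ([2, 4, 5, 3, 2, 1, 4], 3)

def Spec_solution (stones : List Int) (k : Int) (out : Int) : Prop := out = solution_alt stones k
instance (stones : List Int) (k : Int) (out : Int) : Decidable (Spec_solution stones k out) := by
  unfold Spec_solution; infer_instance

-- ===== CLAIM (what is proved, stated in full; the proofs are below) =====
def Claim_equal_solution : Prop := ∀ (stones : List Int) (k : Int), Dom_solution stones k → Pre_solution stones k → Spec_solution stones k (solution stones k)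

-- ===== LEMMAS AND PROOFS =====

-- window property: every block of k consecutive positions fitting in the list holds a stone ≥ m
def WinOK (stones : List Int) (k m : Int) : Prop :=
  ∀ j : Int, 0 ≤ j → j + k ≤ (stones.length : Int) →
    ∃ i : Int, j ≤ i ∧ i < j + k ∧ m ≤ PySem.List.pyGetD stones i 0

theorem goAvail_ne_pred (here : Int) (stones : List Int) (water k : Int)
    (h : goAvail here stones water k ≠ -1) :
    water ≤ PySem.List.pyGetD stones (goAvail here stones water k) 0 := by
  unfold goAvail at *
  rcases hf : (PySem.List.pyRange (here + k) here (-1)).find?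
      (fun i => decide (water ≤ PySem.List.pyGetD stones i 0)) with _ | idx
  · simp [hf] at h
  · have hp := List.find?_some hf
    simp [hf]
    simpa using hp

theorem goAvail_eq_none (here : Int) (stones : List Int) (water k : Int)
    (hh : -1 ≤ here) (h : goAvail here stones water k = -1) :
    ∀ i : Int, here < i → i ≤ here + k → ¬ (water ≤ PySem.List.pyGetD stones i 0) := by
  intro i hi1 hi2 hge
  unfold goAvail at h
  rcases hf : (PySem.List.pyRange (here + k) here (-1)).find?
      (fun i => decide (water ≤ PySem.List.pyGetD stones i 0)) with _ | idx
  · have : i ∈ PySem.List.pyRange (here + k) here (-1) := by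
      rw [PySem.List.mem_pyRange_neg_one]; omega
    have := List.find?_eq_none.mp hf i this
    simp at this
    omega
  · simp [hf] at h
    have hm := List.mem_of_find?_eq_some hf
    rw [PySem.List.mem_pyRange_neg_one] at hm
    omega

theorem checkLoop_to_win_aux (stones : List Int) (m k : Int) :
    ∀ N : Nat, ∀ here : Int, ((stones.length : Int) - here).toNat ≤ N →
      checkLoop stones m k here = true →
      ∀ j : Int, here < j → j + k ≤ (stones.length : Int) →
        ∃ i : Int, j ≤ i ∧ i < j + k ∧ m ≤ PySem.List.pyGetD stones i 0 := by
  intro N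
  induction N with
  | zero =>
    intro here hN hc j hj1 hj2
    rw [checkLoop] at hc
    split_ifs at hc with hg
    · by_cases h2 : goAvail here stones m k = -1
      · simp [h2] at hc
      · have hb := goAvail_ne_bounds here stones m k h2
        omega
    · omega
  | succ n ih =>
    intro here hN hc j hj1 hj2
    rw [checkLoop] at hc
    split_ifs at hc with hg
    · by_cases h2 : goAvail here stones m k = -1
      · simp [h2] at hc
      · simp only [h2, dite_false] at hc
        have hb := goAvail_ne_bounds here stones m k h2
        have hp := goAvail_ne_pred here stones m k h2
        by_cases hcase : j ≤ goAvail here stones m k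
        · exact ⟨goAvail here stones m k, hcase, by omega, hp⟩
        · exact ih (goAvail here stones m k) (by omega) hc j (by omega) hj2
    · omega

theorem checkLoop_to_win (stones : List Int) (m k : Int) :
    ∀ here : Int, checkLoop stones m k here = true →
      ∀ j : Int, here < j → j + k ≤ (stones.length : Int) →
        ∃ i : Int, j ≤ i ∧ i < j + k ∧ m ≤ PySem.List.pyGetD stones i 0 :=
  fun here => checkLoop_to_win_aux stones m k (((stones.length : Int) - here).toNat) here le_rfl

theorem win_to_checkLoop_aux (stones : List Int) (m k : Int) :
    ∀ N : Nat, ∀ here : Int, ((stones.length : Int) - here).toNat ≤ N → -1 ≤ here →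
      (∀ j : Int, here < j → j + k ≤ (stones.length : Int) →
        ∃ i : Int, j ≤ i ∧ i < j + k ∧ m ≤ PySem.List.pyGetD stones i 0) →
      checkLoop stones m k here = true := by
  intro N
  induction N with
  | zero =>
    intro here hN hh hw
    rw [checkLoop]
    split_ifs with hg
    · obtain ⟨i, hi1, hi2, hi3⟩ := hw (here + 1) (by omega) (by omega)
      exfalso; omega
    · rfl
  | succ n ih =>
    intro here hN hh hw
    rw [checkLoop]
    split_ifs with hg
    · obtain ⟨i, hi1, hi2, hi3⟩ := hw (here + 1) (by omega) (by omega)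
      by_cases h2 : goAvail here stones m k = -1
      · exact absurd hi3 (goAvail_eq_none here stones m k hh h2 i (by omega) (by omega))
      · simp only [h2, dite_false]
        have hb := goAvail_ne_bounds here stones m k h2
        exact ih (goAvail here stones m k) (by omega) (by omega)
          (fun j hj1 hj2 => hw j (by omega) hj2)
    · rfl

theorem win_to_checkLoop (stones : List Int) (m k : Int) :
    ∀ here : Int, -1 ≤ here →
      (∀ j : Int, here < j → j + k ≤ (stones.length : Int) →
        ∃ i : Int, j ≤ i ∧ i < j + k ∧ m ≤ PySem.List.pyGetD stones i 0) →
      checkLoop stones m k here = true :=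
  fun here => win_to_checkLoop_aux stones m k (((stones.length : Int) - here).toNat) here le_rfl

theorem checkLoop_iff_win (stones : List Int) (m k : Int) :
    checkLoop stones m k (-1) = true ↔ WinOK stones k m := by
  constructor
  · intro h j hj0 hjk
    exact checkLoop_to_win stones m k (-1) h j (by omega) hjk
  · intro h
    exact win_to_checkLoop stones m k (-1) le_rfl
      (fun j hj1 hj2 => h j (by omega) hj2)

-- ===== B-side characterisation =====
-- the stone at (in-range) position i, as both ports read it
def sD (stones : List Int) (i : Int) : Int := PySem.List.pyGetD stones i 0

-- value of B's prefix-maximum array at index i (blocks of size w start at multiples of w)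
def preF (stones : List Int) (w : Int) : Nat → Int
  | 0 => sD stones 0
  | i + 1 =>
    if PySem.Int.mod ((i : Int) + 1) w = 0 then sD stones ((i : Int) + 1)
    else max (preF stones w i) (sD stones ((i : Int) + 1))

-- value of B's block-suffix-maximum array at position n-1-j (j counted from the right end)
def dF (stones : List Int) (w n : Int) : Nat → Int
  | 0 => sD stones (n - 1)
  | j + 1 =>
    if PySem.Int.mod (n - 1 - ((j : Int) + 1)) w = w - 1 then sD stones (n - 1 - ((j : Int) + 1))
    else max (dF stones w n j) (sD stones (n - 1 - ((j : Int) + 1)))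

theorem build_pre (stones : List Int) (w : Int) (hw : 1 ≤ w) :
    ∀ mN : Nat,
    (PySem.List.pyRange 0 (mN : Int) 1).foldl
      (fun pre i =>
        if PySem.Int.mod i w = 0 then pre ++ [PySem.List.pyGetD stones i 0]
        else pre ++ [max (PySem.List.pyGetD pre (-1) 0) (PySem.List.pyGetD stones i 0)])
      []
      = (List.range mN).map (preF stones w) := by
  intro mN
  induction mN with
  | zero => rfl
  | succ p ih =>
    rw [show ((p + 1 : Nat) : Int) = (p : Int) + 1 by push_cast; ring]
    rw [PySem.List.pyRange_one_succ_right (by omega), List.foldl_append, ih]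
    rw [List.range_succ, List.map_append, List.map_cons, List.map_nil]
    simp only [List.foldl_cons, List.foldl_nil]
    cases p with
    | zero =>
      have h0 : PySem.Int.mod (0 : Int) w = 0 := by
        rw [PySem.Int.mod_eq_emod_of_pos (by omega)]; simp
      simp [h0, preF, sD]
    | succ q =>
      have hlast : PySem.List.pyGetD ((List.range (q + 1)).map (preF stones w)) (-1) 0
          = preF stones w q := by
        rw [List.range_succ, List.map_append, List.map_cons, List.map_nil]
        exact PySem.List.pyGetD_neg_one_append_singleton _ _ _
      rw [show ((q + 1 : Nat) : Int) = (q : Int) + 1 by push_cast; ring]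
      rw [preF]
      by_cases hc : PySem.Int.mod ((q : Int) + 1) w = 0
      · rw [if_pos hc, if_pos hc]
        rfl
      · rw [if_neg hc, if_neg hc, hlast]
        rfl

theorem pyRange_neg_one_append_last (a b : Int) (h : b < a) :
    PySem.List.pyRange a b (-1) = PySem.List.pyRange a (b + 1) (-1) ++ [b + 1] := by
  rw [PySem.List.pyRange_neg_one_eq_reverse a b, PySem.List.pyRange_one_cons (by omega),
    List.reverse_cons, PySem.List.pyRange_neg_one_eq_reverse a (b + 1)]

theorem build_suf (stones : List Int) (w n : Int) (hw : 1 ≤ w) (hn1 : 1 ≤ n) :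
    ∀ qN : Nat, ((qN : Int) ≤ n) →
    (PySem.List.pyRange (n - 1) (n - 1 - (qN : Int)) (-1)).foldl
      (fun suf i =>
        if PySem.Int.mod i w = w - 1 ∨ i = n - 1 then suf ++ [PySem.List.pyGetD stones i 0]
        else suf ++ [max (PySem.List.pyGetD suf (-1) 0) (PySem.List.pyGetD stones i 0)])
      []
      = (List.range qN).map (dF stones w n) := by
  intro qN
  induction qN with
  | zero =>
    intro _
    rw [show n - 1 - ((0 : Nat) : Int) = n - 1 by push_cast; ring]
    rw [PySem.List.pyRange_neg_one_eq_nil (by omega)]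
    rfl
  | succ p ih =>
    intro hq
    rw [show n - 1 - ((p + 1 : Nat) : Int) = (n - 1 - (p : Int)) - 1 by push_cast; ring]
    rw [show (n - 1 - (p : Int)) - 1 = (n - 1 - (p : Int) - 1) by ring]
    rw [pyRange_neg_one_append_last (n - 1) (n - 1 - (p : Int) - 1) (by omega)]
    rw [show n - 1 - (p : Int) - 1 + 1 = n - 1 - (p : Int) by ring]
    rw [List.foldl_append, ih (by omega)]
    rw [List.range_succ, List.map_append, List.map_cons, List.map_nil]
    simp only [List.foldl_cons, List.foldl_nil]
    cases p with
    | zero =>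
      rw [if_pos (Or.inr (by omega))]
      simp [dF, sD]
    | succ q =>
      have hlast : PySem.List.pyGetD ((List.range (q + 1)).map (dF stones w n)) (-1) 0
          = dF stones w n q := by
        rw [List.range_succ, List.map_append, List.map_cons, List.map_nil]
        exact PySem.List.pyGetD_neg_one_append_singleton _ _ _
      rw [show n - 1 - ((q + 1 : Nat) : Int) = n - 1 - ((q : Int) + 1) by push_cast; ring]
      rw [dF]
      by_cases hc : PySem.Int.mod (n - 1 - ((q : Int) + 1)) w = w - 1
      · rw [if_pos (Or.inl hc), if_pos hc]
        rfl
      · rw [if_neg (by rintro (h | h) <;> omega), if_neg hc, hlast]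
        rfl

-- (w*q + s) % w = s for 0 ≤ s < w (variable positive w)
theorem emod_block (w q s : Int) (hw : 0 < w) (h0 : 0 ≤ s) (h1 : s < w) :
    (w * q + s) % w = s := by
  rw [Int.add_comm, Int.add_mul_emod_self_left, Int.emod_eq_of_lt h0 h1]

-- successor of an integer modulo w (variable positive w)
theorem emod_succ (x w : Int) (hw : 0 < w) :
    (x % w = w - 1 ∧ (x + 1) % w = 0) ∨ (x % w < w - 1 ∧ (x + 1) % w = x % w + 1) := by
  have hd := Int.ediv_add_emod x w
  have h0 := Int.emod_nonneg x (by omega : w ≠ 0)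
  have h1 := Int.emod_lt_of_pos x hw
  by_cases hc : x % w = w - 1
  · refine Or.inl ⟨hc, ?_⟩
    rw [show x + 1 = w * (x / w + 1) + 0 by rw [Int.mul_add]; omega]
    exact emod_block w _ 0 hw le_rfl hw
  · refine Or.inr ⟨by omega, ?_⟩
    rw [show x + 1 = w * (x / w) + (x % w + 1) by omega]
    exact emod_block w _ _ hw (by omega) (by omega)

theorem charPre (stones : List Int) (w : Int) (hw : 1 ≤ w) :
    ∀ iN : Nat, ∀ m : Int,
      (m ≤ preF stones w iN ↔
        ∃ t : Int, (iN : Int) - (iN : Int) % w ≤ t ∧ t ≤ (iN : Int) ∧ m ≤ sD stones t) := by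
  intro iN
  induction iN with
  | zero =>
    intro m
    simp only [preF, Nat.cast_zero, Int.zero_emod]
    constructor
    · intro h
      exact ⟨0, by omega, by omega, h⟩
    · rintro ⟨t, h1, h2, h3⟩
      have ht : t = 0 := by omega
      rw [ht] at h3
      exact h3
  | succ i ih =>
    intro m
    rw [preF, show ((i + 1 : Nat) : Int) = (i : Int) + 1 by push_cast; ring]
    have h0 := Int.emod_nonneg (i : Int) (by omega : w ≠ 0)
    have h1 := Int.emod_lt_of_pos (i : Int) (by omega : (0:Int) < w)
    rcases emod_succ (i : Int) w (by omega) with ⟨hr, hs⟩ | ⟨hr, hs⟩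
    · rw [if_pos (by rw [PySem.Int.mod_eq_emod_of_pos (by omega)]; exact hs), hs]
      constructor
      · intro h
        exact ⟨(i : Int) + 1, by omega, by omega, h⟩
      · rintro ⟨t, ht1, ht2, ht3⟩
        have ht : t = (i : Int) + 1 := by omega
        rw [ht] at ht3
        exact ht3
    · rw [if_neg (by rw [PySem.Int.mod_eq_emod_of_pos (by omega)]; omega), hs]
      rw [le_max_iff, ih m]
      constructor
      · rintro (⟨t, ht1, ht2, ht3⟩ | h)
        · exact ⟨t, by omega, by omega, ht3⟩
        · exact ⟨(i : Int) + 1, by omega, by omega, h⟩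
      · rintro ⟨t, ht1, ht2, ht3⟩
        by_cases htc : t ≤ (i : Int)
        · exact Or.inl ⟨t, by omega, by omega, ht3⟩
        · have ht : t = (i : Int) + 1 := by omega
          rw [ht] at ht3
          exact Or.inr ht3

theorem charSuf (stones : List Int) (w n : Int) (hw : 1 ≤ w) :
    ∀ jN : Nat, ((jN : Int) ≤ n - 1) → ∀ m : Int,
      (m ≤ dF stones w n jN ↔
        ∃ t : Int, n - 1 - (jN : Int) ≤ t ∧
          t ≤ min (n - 1 - (jN : Int) - (n - 1 - (jN : Int)) % w + (w - 1)) (n - 1) ∧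
          m ≤ sD stones t) := by
  intro jN
  induction jN with
  | zero =>
    intro hj m
    have h0 := Int.emod_nonneg (n - 1) (by omega : w ≠ 0)
    have h1 := Int.emod_lt_of_pos (n - 1) (by omega : (0:Int) < w)
    simp only [dF, Nat.cast_zero, Int.sub_zero]
    constructor
    · intro h
      exact ⟨n - 1, by omega, by omega, by simpa using h⟩
    · rintro ⟨t, ht1, ht2, ht3⟩
      have ht : t = n - 1 := by omega
      rw [ht] at ht3
      simpa using ht3
  | succ j ih =>
    intro hj m
    rw [dF, show ((j + 1 : Nat) : Int) = (j : Int) + 1 by push_cast; ring]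
    have h0 := Int.emod_nonneg (n - 1 - ((j : Int) + 1)) (by omega : w ≠ 0)
    have h1 := Int.emod_lt_of_pos (n - 1 - ((j : Int) + 1)) (by omega : (0:Int) < w)
    by_cases hc : (n - 1 - ((j : Int) + 1)) % w = w - 1
    · rw [if_pos (by rw [PySem.Int.mod_eq_emod_of_pos (by omega)]; exact hc)]
      constructor
      · intro h
        exact ⟨n - 1 - ((j : Int) + 1), by omega, by omega, h⟩
      · rintro ⟨t, ht1, ht2, ht3⟩
        have ht : t = n - 1 - ((j : Int) + 1) := by omega
        rw [ht] at ht3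
        exact ht3
    · rw [if_neg (by rw [PySem.Int.mod_eq_emod_of_pos (by omega)]; omega)]
      rw [le_max_iff, ih (by omega) m]
      have hstep : (n - 1 - (j : Int)) % w = (n - 1 - ((j : Int) + 1)) % w + 1 := by
        rcases emod_succ (n - 1 - ((j : Int) + 1)) w (by omega) with ⟨hr, hs⟩ | ⟨hr, hs⟩
        · exact absurd hr hc
        · rw [show n - 1 - (j : Int) = (n - 1 - ((j : Int) + 1)) + 1 by ring, hs]
      constructor
      · rintro (⟨t, ht1, ht2, ht3⟩ | h)
        · exact ⟨t, by omega, by omega, ht3⟩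
        · exact ⟨n - 1 - ((j : Int) + 1), by omega, by omega, h⟩
      · rintro ⟨t, ht1, ht2, ht3⟩
        by_cases htc : n - 1 - (j : Int) ≤ t
        · exact Or.inl ⟨t, by omega, by omega, ht3⟩
        · have ht : t = n - 1 - ((j : Int) + 1) := by omega
          rw [ht] at ht3
          exact Or.inr ht3

-- the combined window maximum B forms from the two arrays
theorem charWin (stones : List Int) (w n j : Int) (hw : 1 ≤ w) (hwn : w ≤ n)
    (hn : n = (stones.length : Int)) (hj0 : 0 ≤ j) (hj1 : j ≤ n - w) (m : Int) :
    (m ≤ max (dF stones w n (n - 1 - j).toNat) (preF stones w (j + w - 1).toNat) ↔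
      ∃ t : Int, j ≤ t ∧ t < j + w ∧ m ≤ sD stones t) := by
  have hn1 : 1 ≤ n := by omega
  have hsj : ((n - 1 - j).toNat : Int) = n - 1 - j := by omega
  have hpj : (((j + w - 1).toNat : Nat) : Int) = j + w - 1 := by omega
  rw [le_max_iff, charSuf stones w n hw (n - 1 - j).toNat (by omega) m,
    charPre stones w hw (j + w - 1).toNat m, hsj, hpj]
  rw [show n - 1 - (n - 1 - j) = j by ring]
  have h0 := Int.emod_nonneg j (by omega : w ≠ 0)
  have h1 := Int.emod_lt_of_pos j (by omega : (0:Int) < w)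
  have hd := Int.ediv_add_emod j w
  have hpm : (j + w - 1) % w = w - 1 ∧ j % w = 0 ∨
      (j + w - 1) % w = j % w - 1 ∧ 1 ≤ j % w := by
    by_cases hr : j % w = 0
    · refine Or.inl ⟨?_, hr⟩
      rw [show j + w - 1 = w * (j / w) + (w - 1) by omega]
      exact emod_block w _ _ (by omega) (by omega) (by omega)
    · refine Or.inr ⟨?_, by omega⟩
      rw [show j + w - 1 = w * (j / w + 1) + (j % w - 1) by rw [Int.mul_add]; omega]
      exact emod_block w _ _ (by omega) (by omega) (by omega)
  constructor
  · rintro (⟨t, ht1, ht2, ht3⟩ | ⟨t, ht1, ht2, ht3⟩)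
    · exact ⟨t, by omega, by omega, ht3⟩
    · rcases hpm with ⟨hp1, hp2⟩ | ⟨hp1, hp2⟩ <;> exact ⟨t, by omega, by omega, ht3⟩
  · rintro ⟨t, ht1, ht2, ht3⟩
    by_cases htc : t ≤ j - j % w + (w - 1)
    · exact Or.inl ⟨t, by omega, by omega, ht3⟩
    · rcases hpm with ⟨hp1, hp2⟩ | ⟨hp1, hp2⟩
      · exact absurd ht2 (by omega)
      · exact Or.inr ⟨t, by omega, by omega, ht3⟩

-- B's minimum-tracking fold, for any per-index value f
theorem fold_step_some (f : Int → Int) (l : List Int) (b : Int) :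
    l.foldl (fun best j =>
        match best with
        | none => some (f j)
        | some b => if f j < b then some (f j) else some b) (some b)
      = some (l.foldl (fun a j => min a (f j)) b) := by
  induction l generalizing b with
  | nil => rfl
  | cons x t ih =>
    simp only [List.foldl_cons]
    have hmin : (if f x < b then some (f x) else some b) = some (min b (f x)) := by
      rw [min_def]; split_ifs <;> (first | rfl | omega)
    rw [hmin]
    exact ih (min b (f x))

theorem bsLoop_eq_aux (stones : List Int) (k T : Int) :
    ∀ N : Nat, ∀ l r a : Int, (r - l + 1).toNat ≤ N →
      (∀ m : Int, l ≤ m → m ≤ r → (checkLoop stones m k (-1) = true ↔ m ≤ T)) →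
      bsLoop stones k l r a = if l ≤ r ∧ l ≤ T then max a (min r T) else a := by
  intro N
  induction N with
  | zero =>
    intro l r a hN hF
    rw [bsLoop, dif_neg (by omega), if_neg (by omega)]
  | succ n ih =>
    intro l r a hN hF
    rw [bsLoop]
    by_cases hg : l ≤ r
    · rw [dif_pos hg]
      have hmid := PySem.Int.floordiv_two_mid_bounds hg
      by_cases hc : checkLoop stones (PySem.Int.floordiv (l + r) 2) k (-1) = true
      · rw [if_pos hc]
        have hmT : PySem.Int.floordiv (l + r) 2 ≤ T :=
          (hF _ (by omega) (by omega)).mp hc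
        rw [ih (PySem.Int.floordiv (l + r) 2 + 1) r _ (by omega)
            (fun m hm1 hm2 => hF m (by omega) hm2)]
        split_ifs <;> omega
      · rw [if_neg hc]
        have hmT : T < PySem.Int.floordiv (l + r) 2 := by
          by_contra hle
          exact hc ((hF _ (by omega) (by omega)).mpr (by omega))
        rw [ih l (PySem.Int.floordiv (l + r) 2 - 1) a (by omega)
            (fun m hm1 hm2 => hF m hm1 (by omega))]
        split_ifs <;> omega
    · rw [dif_neg hg, if_neg (by omega)]

theorem bsLoop_eq (stones : List Int) (k T : Int) :
    ∀ l r a : Int,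
      (∀ m : Int, l ≤ m → m ≤ r → (checkLoop stones m k (-1) = true ↔ m ≤ T)) →
      bsLoop stones k l r a = if l ≤ r ∧ l ≤ T then max a (min r T) else a := by
  intro l r a hF
  exact bsLoop_eq_aux stones k T ((r - l + 1).toNat) l r a le_rfl hF


theorem build_suf_full (stones : List Int) (w : Int) (hw : 1 ≤ w)
    (hn1 : 1 ≤ (stones.length : Int)) :
    (PySem.List.pyRange ((stones.length : Int) - 1) (-1) (-1)).foldl
      (fun suf i =>
        if PySem.Int.mod i w = w - 1 ∨ i = (stones.length : Int) - 1 then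
          suf ++ [PySem.List.pyGetD stones i 0]
        else suf ++ [max (PySem.List.pyGetD suf (-1) 0) (PySem.List.pyGetD stones i 0)])
      []
      = (List.range stones.length).map (dF stones w (stones.length : Int)) := by
  have h := build_suf stones w (stones.length : Int) hw hn1 stones.length (by omega)
  rw [show (stones.length : Int) - 1 - (stones.length : Int) = -1 by ring] at h
  exact h

theorem alt_eval (stones : List Int) (k n w : Int) (hk : 0 < k)
    (hn : n = (stones.length : Int)) (hw : w = min k n) (hn1 : 1 ≤ n) :
    solution_alt stones k
      = max 0 (((PySem.List.pyRange 0 (n - w + 1) 1).foldl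
          (fun best j =>
            let m := max
              (PySem.List.pyGetD (((List.range n.toNat).map (dF stones w n)).reverse) j 0)
              (PySem.List.pyGetD ((List.range n.toNat).map (preF stones w)) (j + w - 1) 0)
            match best with
            | none => some m
            | some b => if m < b then some m else some b)
          none).getD 0) := by
  subst hn
  subst hw
  unfold solution_alt
  rw [if_neg (by omega)]
  rw [show ((stones.length : Int)).toNat = stones.length from by simp]
  simp only [build_pre stones (min k (stones.length : Int)) (by omega) stones.length,
    build_suf_full stones (min k (stones.length : Int)) (by omega) (by omega)]

theorem checkLoop_k_nonpos (stones : List Int) (m k : Int) (hk : k ≤ 0)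
    (hn : 1 ≤ (stones.length : Int)) : checkLoop stones m k (-1) = false := by
  rw [checkLoop, dif_pos (by omega)]
  have hg : goAvail (-1) stones m k = -1 := by
    rw [show goAvail (-1) stones m k
        = (match List.find? (fun i => decide (m ≤ PySem.List.pyGetD stones i 0))
            (PySem.List.pyRange (-1 + k) (-1) (-1)) with
          | some idx => idx
          | none => -1) from rfl,
      PySem.List.pyRange_neg_one_eq_nil (by omega)]
    rfl
  simp [hg]

-- ===== VERDICT (by name: the statement is the Claim_ definition above) =====
theorem solution_spec : Claim_equal_solution := by
  unfold Claim_equal_solution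
  intro stones k _hdom hpre
  unfold Pre_solution at hpre
  unfold Spec_solution
  have hn : 1 ≤ (stones.length : Int) := by
    cases stones with
    | nil => exact absurd rfl hpre
    | cons x t => simp
  -- the real maximum of the list
  rcases hM : PySem.List.max? stones (fun x => x) with _ | M
  · exact absurd ((PySem.List.max?_eq_none_iff _ _).mp hM) hpre
  have hMmax : ∀ y ∈ stones, y ≤ M := by
    intro y hy
    simpa using PySem.List.max?_isMax hM y hy
  have hMmem : M ∈ stones := PySem.List.max?_mem hM
  by_cases hk : k ≤ 0
  · -- k ≤ 0: both sides are 0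
    have hB : solution_alt stones k = 0 := by
      unfold solution_alt; rw [if_pos hk]
    rw [hB]
    unfold solution
    rw [hM]
    simp only [Option.getD_some]
    rw [bsLoop_eq stones k (-1) 0 M 0
      (fun m hm1 hm2 => by simp [checkLoop_k_nonpos stones m k hk hn]; omega)]
    rw [if_neg (by omega)]
  · -- k ≥ 1
    rw [not_le] at hk
    set n : Int := (stones.length : Int) with hndef
    set w : Int := min k n with hwdef
    have hw1 : 1 ≤ w := by omega
    have hwn : w ≤ n := by omega
    -- B's two auxiliary arrays
    set pre : List Int := (List.range n.toNat).map (preF stones w) with hpredef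
    set suf : List Int := ((List.range n.toNat).map (dF stones w n)).reverse with hsufdef
    -- the per-window value B reads off the two arrays
    set f : Int → Int := fun j =>
      max (PySem.List.pyGetD suf j 0) (PySem.List.pyGetD pre (j + w - 1) 0) with hfdef
    have hf_eq : ∀ j : Int, 0 ≤ j → j ≤ n - w →
        f j = max (dF stones w n (n - 1 - j).toNat) (preF stones w (j + w - 1).toNat) := by
      intro j hj0 hj1
      rw [hfdef]
      have h1 : PySem.List.pyGetD pre (j + w - 1) 0 = preF stones w (j + w - 1).toNat := by
        rw [hpredef, PySem.List.pyGetD_eq_getElem _ _ (by omega) (by simp; omega)]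
        simp only [List.getElem_map, List.getElem_range]
      have h2 : PySem.List.pyGetD suf j 0 = dF stones w n (n - 1 - j).toNat := by
        rw [hsufdef, PySem.List.pyGetD_eq_getElem _ _ (by omega) (by simp; omega)]
        rw [List.getElem_reverse]
        simp only [List.getElem_map, List.getElem_range]
        congr 1
        simp
        omega
      simp only [h1, h2]
    -- window characterisation for B's value
    have hfwin : ∀ j : Int, 0 ≤ j → j ≤ n - w → ∀ m : Int,
        (m ≤ f j ↔ ∃ t : Int, j ≤ t ∧ t < j + w ∧ m ≤ sD stones t) := by
      intro j hj0 hj1 m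
      rw [hf_eq j hj0 hj1]
      exact charWin stones w n j hw1 hwn hndef hj0 hj1 m
    -- peel the first index off B's range
    have hR : PySem.List.pyRange 0 (n - w + 1) 1 = 0 :: PySem.List.pyRange 1 (n - w + 1) 1 :=
      PySem.List.pyRange_one_cons (by omega)
    set R' : List Int := PySem.List.pyRange 1 (n - w + 1) 1 with hR'def
    set Wmin : Int := R'.foldl (fun a j => min a (f j)) (f 0) with hWdef
    have hfold : (PySem.List.pyRange 0 (n - w + 1) 1).foldl
        (fun best j =>
          let m := max (PySem.List.pyGetD suf j 0) (PySem.List.pyGetD pre (j + w - 1) 0)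
          match best with
          | none => some m
          | some b => if m < b then some m else some b)
        none = some Wmin := by
      rw [hR]
      simp only [List.foldl_cons]
      exact fold_step_some f R' (f 0)
    have hB : solution_alt stones k = max 0 Wmin := by
      rw [alt_eval stones k n w hk hndef hwdef hn, hfold, Option.getD_some]
    -- Wmin is the least of the values f j
    have hmap : (R'.map f).foldl min (f 0) = Wmin := by
      rw [hWdef, List.foldl_map]
    have hlow : ∀ j : Int, 0 ≤ j → j < n - w + 1 → Wmin ≤ f j := by
      intro j hj1 hj2
      rcases eq_or_lt_of_le hj1 with hj0 | hj0
      · rw [← hj0]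
        rw [← hmap]
        exact (PySem.List.foldl_min_le _ _).1
      · rw [← hmap]
        exact (PySem.List.foldl_min_le _ _).2 (f j)
          (List.mem_map_of_mem (by rw [hR'def, PySem.List.mem_pyRange_one]; omega))
    have hex : ∃ j0 : Int, 0 ≤ j0 ∧ j0 < n - w + 1 ∧ Wmin = f j0 := by
      rcases PySem.List.foldl_min_mem (R'.map f) (f 0) with h | h
      · exact ⟨0, le_refl 0, by omega, by rw [← hmap, h]⟩
      · rw [hmap] at h
        obtain ⟨j0, hj0, hval⟩ := List.mem_map.mp h
        rw [hR'def, PySem.List.mem_pyRange_one] at hj0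
        exact ⟨j0, by omega, by omega, hval.symm⟩
    -- Wmin ≤ M
    have hWM : Wmin ≤ M := by
      obtain ⟨j0, hj1, hj2, hval⟩ := hex
      obtain ⟨i, hi1, hi2, hi3⟩ :=
        (hfwin j0 hj1 (by omega) (f j0)).mp (by omega)
      have : sD stones i ∈ stones := by
        unfold sD
        rw [PySem.List.pyGetD_eq_getElem _ _ (by omega) (by omega)]
        exact List.getElem_mem _
      have := hMmax _ this
      omega
    -- feasibility ↔ m ≤ Wmin, for the levels the search visits
    have hFiff : ∀ m : Int, 0 ≤ m → m ≤ M →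
        (checkLoop stones m k (-1) = true ↔ m ≤ Wmin) := by
      intro m _hm0 hmM
      rw [checkLoop_iff_win]
      constructor
      · intro hwin
        obtain ⟨j0, hj1, hj2, hval⟩ := hex
        rw [hval]
        by_cases hkn : k ≤ n
        · -- w = k: the window at j0 fits
          obtain ⟨i, hi1, hi2, hi3⟩ := hwin j0 hj1 (by omega)
          exact (hfwin j0 hj1 (by omega) m).mpr ⟨i, by omega, by omega, hi3⟩
        · -- k > n: only window is the whole list; m ≤ M suffices
          obtain ⟨iM, hiM, hMv⟩ := List.mem_iff_getElem.mp hMmem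
          refine (hfwin j0 hj1 (by omega) m).mpr
            ⟨((iM : Nat) : Int), by omega, by omega, ?_⟩
          unfold sD
          rw [PySem.List.pyGetD_natCast, List.getD_eq_getElem _ _ hiM, hMv]
          omega
      · intro hle j hj1 hj2
        have hjr : j < n - w + 1 := by omega
        have := hlow j hj1 hjr
        obtain ⟨i, hi1, hi2, hi3⟩ :=
          (hfwin j hj1 (by omega) m).mp (by omega)
        exact ⟨i, hi1, by omega, hi3⟩
    -- evaluate A via the binary-search lemma
    unfold solution
    rw [hM]
    simp only [Option.getD_some]
    rw [bsLoop_eq stones k Wmin 0 M 0 (fun m hm1 hm2 => hFiff m hm1 hm2)]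
    rw [hB]
    split_ifs <;> omega
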